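-- pv_equiv track=rewrite | github.com/jimzh580/Leetcode-Weekly-Contest | 88-2 Maximize Distance to Closest Person到最近的人的最大距离/849(104ms).py | maxDistToClosest
-- ===== SOURCE A (Python) =====
-- def maxDistToClosest(seats):
--     """
--     :type seats: List[int]
--     :rtype: int
--     """
--     left=-0xfffff
--     maxn=-1
--     for i in range(len(seats)):
--         if seats[i]==0:
--             right=0xfffff
--             for j in range(i+1,len(seats)):
--                 if seats[j]==1:
--                     right=j
--                     break
--             m=min(i-left,right-i)
--             if m>maxn:
--                 maxn=m
--         else:
--             left=i
--     return maxn
-- ===== SOURCE B (Python) =====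
-- def maxDistToClosest(seats):
--     # One backward pass records the next occupied seat for each index,
--     # then one forward pass tracks the previous occupied seat.
--     nxt = []
--     nr = 0xfffff
--     for i in range(len(seats) - 1, -1, -1):
--         nxt.append(nr)
--         if seats[i] == 1:
--             nr = i
--     nxt.reverse()
--     maxn = -1
--     left = -0xfffff
--     for i, (s, nx) in enumerate(zip(seats, nxt)):
--         if s == 0:
--             m = min(i - left, nx - i)
--             if m > maxn:
--                 maxn = m
--         else:
--             left = i
--     return maxn
-- ===== Notes on version B (the rewrite author's own statement) =====
-- stated objective: alternative
-- what changed: Replaced the inner forward rescan for the next occupied seat (repeated for every empty seat) by a single backward pass that precomputes the next-occupied index for every position, then one forward pass tracking the previous occupied seat.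
import Mathlib
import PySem

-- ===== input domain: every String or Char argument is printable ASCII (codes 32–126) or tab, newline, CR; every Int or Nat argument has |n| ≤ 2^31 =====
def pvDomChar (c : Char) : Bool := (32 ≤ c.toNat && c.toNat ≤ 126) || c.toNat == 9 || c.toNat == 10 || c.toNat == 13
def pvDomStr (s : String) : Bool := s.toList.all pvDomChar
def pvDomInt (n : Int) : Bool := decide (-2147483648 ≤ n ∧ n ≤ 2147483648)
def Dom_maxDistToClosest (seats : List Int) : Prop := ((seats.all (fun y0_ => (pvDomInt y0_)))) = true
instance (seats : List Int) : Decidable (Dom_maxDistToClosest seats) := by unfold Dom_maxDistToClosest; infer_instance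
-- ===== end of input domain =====

-- B precomputes the next occupied seat for every index in one backward pass instead of
-- rescanning forward at each empty seat (alternative algorithm); same return value on every input.

-- ===== PORT A =====
-- inner loop: 'right=0xfffff; for j in range(i+1,len(seats)): if seats[j]==1: right=j; break'
-- (pyGetD with default 0 is exact here: every j produced by the range is in bounds)
def findRightA (seats : List Int) (js : List Int) : Int :=
  match js with
  | [] => 0xfffff
  | j :: rest => if PySem.List.pyGetD seats j 0 == 1 then j else findRightA seats rest

def maxDistToClosest (seats : List Int) : Int :=
  let n : Int := seats.length
  let st := (PySem.List.pyRange 0 n 1).foldl (fun (st : Int × Int) i =>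
    if PySem.List.pyGetD seats i 0 == 0 then
      let right := findRightA seats (PySem.List.pyRange (i + 1) n 1)
      let m := min (i - st.1) (right - i)
      (st.1, if m > st.2 then m else st.2)
    else (i, st.2)) (-0xfffff, -1)
  st.2

-- ===== PORT B =====
-- B's backward pass 'for i in range(len(seats)-1,-1,-1): nxt.append(nr); if seats[i]==1: nr=i'
-- followed by nxt.reverse(): expressed as structural recursion that processes the tail
-- (the seats to the right) first; returns (nxt list, nearest 1 in this suffix).
def nxtsB (seats : List Int) (b : Int) : List Int × Int :=
  match seats with
  | [] => ([], 0xfffff)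
  | s :: rest =>
    let (tail, nr) := nxtsB rest (b + 1)
    (nr :: tail, if s == 1 then b else nr)

def maxDistToClosest_alt (seats : List Int) : Int :=
  let nxt := (nxtsB seats 0).1
  let st := (PySem.List.enumerate (seats.zip nxt) 0).foldl
    (fun (st : Int × Int) p =>
      if p.2.1 == 0 then
        let m := min (p.1 - st.1) (p.2.2 - p.1)
        (st.1, if m > st.2 then m else st.2)
      else (p.1, st.2)) (-0xfffff, -1)
  st.2

-- ===== PRECONDITION & SPEC =====
def Spec_maxDistToClosest (seats : List Int) (out : Int) : Prop := out = maxDistToClosest_alt seats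
instance (seats : List Int) (out : Int) : Decidable (Spec_maxDistToClosest seats out) := by unfold Spec_maxDistToClosest; infer_instance

-- ===== CLAIM (what is proved, stated in full; the proofs are below) =====
def Claim_equal_maxDistToClosest : Prop := ∀ (seats : List Int), Dom_maxDistToClosest seats → Spec_maxDistToClosest seats (maxDistToClosest seats)

-- ===== LEMMAS AND PROOFS =====

-- first index ≥ b (absolute) whose seat (listed relatively in xs) is 1, else the sentinel
def findIn : List Int → Int → Int
  | [], _ => 0xfffff
  | s :: rest, b => if s == 1 then b else findIn rest (b + 1)

-- for each position k: (absolute index, seat, next-1 strictly to the right)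
def triples : List Int → Int → List (Int × Int × Int)
  | [], _ => []
  | s :: rest, b => (b, s, findIn rest (b + 1)) :: triples rest (b + 1)

theorem nxtsB_snd (xs : List Int) (b : Int) : (nxtsB xs b).2 = findIn xs b := by
  induction xs generalizing b with
  | nil => rfl
  | cons s rest ih => simp [nxtsB, findIn, ih]

theorem enumerate_zip_nxtsB (xs : List Int) (b : Int) :
    PySem.List.enumerate (xs.zip (nxtsB xs b).1) b = triples xs b := by
  induction xs generalizing b with
  | nil => rfl
  | cons s rest ih =>
    simp [nxtsB, triples, PySem.List.enumerate_cons, nxtsB_snd, ih]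

theorem findRightA_eq (seats : List Int) :
    ∀ (k : Nat) (a : Int), 0 ≤ a → seats.length - a.toNat ≤ k →
      findRightA seats (PySem.List.pyRange a (seats.length : Int) 1) =
        findIn (seats.drop a.toNat) a := by
  intro k
  induction k with
  | zero =>
    intro a ha hk
    rw [PySem.List.pyRange_one_eq_nil (by omega), List.drop_eq_nil_of_le (by omega)]
    rfl
  | succ k ih =>
    intro a ha hk
    by_cases hlt : a < (seats.length : Int)
    · have hnat : a.toNat < seats.length := by omega
      have h1 : (a + 1).toNat = a.toNat + 1 := by omega
      rw [PySem.List.pyRange_one_cons hlt, List.drop_eq_getElem_cons hnat]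
      simp only [findRightA, findIn,
        PySem.List.pyGetD_eq_getElem seats 0 ha hlt]
      rw [ih (a + 1) (by omega) (by omega), h1]
    · rw [PySem.List.pyRange_one_eq_nil (by omega), List.drop_eq_nil_of_le (by omega)]
      rfl

theorem mapA_eq (seats : List Int) :
    ∀ (k : Nat) (a : Int), 0 ≤ a → seats.length - a.toNat ≤ k →
      (PySem.List.pyRange a (seats.length : Int) 1).map (fun i =>
          (i, PySem.List.pyGetD seats i 0,
            findRightA seats (PySem.List.pyRange (i + 1) (seats.length : Int) 1))) =
        triples (seats.drop a.toNat) a := by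
  intro k
  induction k with
  | zero =>
    intro a ha hk
    rw [PySem.List.pyRange_one_eq_nil (by omega), List.drop_eq_nil_of_le (by omega)]
    rfl
  | succ k ih =>
    intro a ha hk
    by_cases hlt : a < (seats.length : Int)
    · have hnat : a.toNat < seats.length := by omega
      have h1 : (a + 1).toNat = a.toNat + 1 := by omega
      rw [PySem.List.pyRange_one_cons hlt, List.drop_eq_getElem_cons hnat, List.map_cons]
      simp only [triples]
      congr 1
      · rw [PySem.List.pyGetD_eq_getElem seats 0 ha hlt,
          findRightA_eq seats seats.length (a + 1) (by omega) (by omega), h1]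
      · rw [ih (a + 1) (by omega) (by omega), h1]
    · rw [PySem.List.pyRange_one_eq_nil (by omega), List.drop_eq_nil_of_le (by omega)]
      rfl

-- ===== VERDICT (by name: the statement is the Claim_ definition above) =====
theorem triples_eq_map (seats : List Int) :
    triples seats 0 =
      (PySem.List.pyRange 0 (seats.length : Int) 1).map (fun i =>
        (i, PySem.List.pyGetD seats i 0,
          findRightA seats (PySem.List.pyRange (i + 1) (seats.length : Int) 1))) := by
  have h := mapA_eq seats seats.length 0 le_rfl (by omega)
  simpa using h.symm

theorem maxDistToClosest_spec : Claim_equal_maxDistToClosest := by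
  intro seats _
  show maxDistToClosest seats = maxDistToClosest_alt seats
  simp only [maxDistToClosest, maxDistToClosest_alt]
  rw [enumerate_zip_nxtsB seats 0, triples_eq_map, List.foldl_map]
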